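-- pv_equiv track=rewrite | github.com/heeya15/Algorithm_Study | 2022_11_Study/221110/장예찬_boj_1449_수리공 항승.py | solution
-- ===== SOURCE A (Python) =====
-- def solution(n, l, leaks):
--     answer = 0
--     for idx, leak in enumerate(leaks): # 물이 새는 곳을 하나씩 확인
--         if leak == -1: # 이미 테이프로 막혀있으면 넘어감
--             continue
--         if leak == 1: # 테이프로 막혀있지 않으면
--             answer += 1 # 테이프를 하나 더 붙이고
--             for i in range(idx, idx + l): # 테이프를 붙이면서 물이 새는 곳을 -1로 표시
--                 if i >= 1001:
--                     break
--                 leaks[i] = -1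
--     return answer
-- ===== SOURCE B (Python) =====
-- def solution(n, l, leaks):
--     # Single read-only scan: a scalar `covered` (first index not covered by any
--     # tape so far) replaces A's in-place -1 marking of the array.  The cap at
--     # 1001 is A's board bound (positions past 1000 are never marked).
--     # NOTE: unlike A, this does not mutate `leaks`; the equivalence claimed is
--     # about the return value only.
--     answer = 0
--     covered = 0
--     for idx, leak in enumerate(leaks):
--         if leak == 1 and idx >= covered:
--             answer += 1
--             covered = min(idx + l, 1001)
--     return answer
-- ===== Notes on version B (the rewrite author's own statement) =====
-- stated objective: simpler
-- what changed: B replaces A's in-place marking of covered cells with -1 (and re-reading those sentinels) by a single read-only scan that tracks one scalar `covered` = first index not yet taped; B does not mutate the input list, only the return value is matched.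
import Mathlib
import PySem

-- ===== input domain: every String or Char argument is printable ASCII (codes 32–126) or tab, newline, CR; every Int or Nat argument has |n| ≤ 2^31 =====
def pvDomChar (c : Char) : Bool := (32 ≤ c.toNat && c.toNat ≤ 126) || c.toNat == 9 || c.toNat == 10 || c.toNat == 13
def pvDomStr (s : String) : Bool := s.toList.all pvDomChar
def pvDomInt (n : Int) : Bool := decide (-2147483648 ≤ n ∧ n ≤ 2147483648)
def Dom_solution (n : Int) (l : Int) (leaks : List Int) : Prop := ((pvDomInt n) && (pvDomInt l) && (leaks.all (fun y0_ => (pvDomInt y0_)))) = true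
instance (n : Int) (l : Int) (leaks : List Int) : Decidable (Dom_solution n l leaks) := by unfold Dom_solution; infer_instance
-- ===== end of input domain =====

-- B tracks coverage with one scalar instead of A's -1 sentinels written into the list;
-- B does not mutate `leaks`, the equivalence proved is about the return value only.

-- ===== PORT A =====
-- inner loop: for i in range(idx, idx+l): if i >= 1001: break; leaks[i] = -1
-- (List.set is a no-op out of range; Python raises IndexError there — excluded by Pre_)
def markA : List Int → List Int → List Int
  | cur, [] => cur
  | cur, i :: rest => if i ≥ 1001 then cur else markA (cur.set i.toNat (-1)) rest

-- outer loop: Python's `for idx, leak in enumerate(leaks)` iterates over the LIVE list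
-- being mutated (length is preserved), so it is ported as an index loop reading the
-- current list at each step.
def loopA (l : Int) : List Nat → List Int × Int → List Int × Int
  | [], st => st
  | idx :: rest, st =>
      let leak := st.1.getD idx 0
      if leak = -1 then loopA l rest st
      else if leak = 1 then
        loopA l rest (markA st.1 (PySem.List.pyRange (idx : Int) ((idx : Int) + l) 1), st.2 + 1)
      else loopA l rest st

def solution (n : Int) (l : Int) (leaks : List Int) : Int :=
  (loopA l (List.range leaks.length) (leaks, 0)).2

-- ===== PORT B =====
def loopB (l : Int) : List (Int × Int) → Int × Int → Int
  | [], st => st.1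
  | (i, v) :: rest, (ans, cov) =>
      if v = 1 ∧ cov ≤ i then loopB l rest (ans + 1, min (i + l) 1001)
      else loopB l rest (ans, cov)

def solution_alt (n : Int) (l : Int) (leaks : List Int) : Int :=
  loopB l (PySem.List.enumerate leaks 0) (0, 0)

-- ===== PRECONDITION & SPEC =====
-- Helper used only to STATE Pre_/Raises_ exactly (it reaches neither port): scans the
-- list once and reports whether some tape A greedily places would write past the end.
def greedyOverflow (l len : Int) : List Int → Int → Int → Bool
  | [], _, _ => false
  | v :: rest, idx, cov =>
      if v = 1 ∧ cov ≤ idx then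
        (if len < idx + l then true else greedyOverflow l len rest (idx + 1) (idx + l))
      else greedyOverflow l len rest (idx + 1) cov

-- Pre_ excludes EXACTLY the inputs on which A raises IndexError (a board shorter than
-- 1001 on which some greedily placed tape writes past the end of the list); on every
-- admitted input A returns normally.
def Pre_solution (n : Int) (l : Int) (leaks : List Int) : Prop :=
  1001 ≤ (leaks.length : Int) ∨ greedyOverflow l (leaks.length : Int) leaks 0 0 = false

instance (n : Int) (l : Int) (leaks : List Int) : Decidable (Pre_solution n l leaks) := by
  unfold Pre_solution; infer_instance

def pvWitness_solution : Int × Int × List Int := (4, 2, [1, 0, 1, 0])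

def Spec_solution (n : Int) (l : Int) (leaks : List Int) (out : Int) : Prop := out = solution_alt n l leaks
instance (n : Int) (l : Int) (leaks : List Int) (out : Int) : Decidable (Spec_solution n l leaks out) := by unfold Spec_solution; infer_instance

-- ===== CLAIM (what is proved, stated in full; the proofs are below) =====
def Claim_equal_solution : Prop := ∀ (n : Int) (l : Int) (leaks : List Int), Dom_solution n l leaks → Pre_solution n l leaks → Spec_solution n l leaks (solution n l leaks)

-- ===== LEMMAS AND PROOFS =====

theorem markA_length : ∀ (r cur : List Int), (markA cur r).length = cur.length := by
  intro r
  induction r with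
  | nil => intro cur; rfl
  | cons i rest ih =>
      intro cur
      simp only [markA]
      split
      · rfl
      · rw [ih]; simp

-- what markA writes on an increasing range: exactly the in-range cells of [a, min(b,1001))
theorem markA_getD (b : Int) : ∀ (n : Nat) (a : Int), 0 ≤ a → (b - a).toNat = n →
    ∀ (cur : List Int) (j : Nat),
      (markA cur (PySem.List.pyRange a b 1)).getD j 0 =
        if a ≤ (j : Int) ∧ (j : Int) < b ∧ (j : Int) < 1001 ∧ j < cur.length then -1
        else cur.getD j 0 := by
  intro n
  induction n with
  | zero =>
      intro a ha hn cur j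
      have hba : b ≤ a := by omega
      rw [PySem.List.pyRange_one_eq_nil hba]
      have hneg : ¬(a ≤ (j : Int) ∧ (j : Int) < b ∧ (j : Int) < 1001 ∧ j < cur.length) := by
        rintro ⟨h1, h2, -, -⟩; omega
      simp only [markA]
      rw [if_neg hneg]
  | succ n ih =>
      intro a ha hn cur j
      have hab : a < b := by omega
      rw [PySem.List.pyRange_one_cons hab]
      simp only [markA]
      split
      · rename_i h1001
        have hneg : ¬(a ≤ (j : Int) ∧ (j : Int) < b ∧ (j : Int) < 1001 ∧ j < cur.length) := by
          rintro ⟨h1, -, h3, -⟩; omega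
        rw [if_neg hneg]
      · rename_i h1001
        have h1001' : a < 1001 := by omega
        rw [ih (a + 1) (by omega) (by omega)]
        have hlen : (cur.set a.toNat (-1)).length = cur.length := by simp
        by_cases hja : (j : Int) = a
        · have hj : j = a.toNat := by omega
          by_cases hjl : j < cur.length
          · have h1 : (cur.set a.toNat (-1)).getD j 0 = -1 := by
              rw [List.getD_eq_getElem?_getD, hj, List.getElem?_set_self (by omega)]
              simp
            have hc1 : ¬((a + 1 ≤ (j : Int)) ∧ (j : Int) < b ∧ (j : Int) < 1001 ∧
                j < (cur.set a.toNat (-1)).length) := by rintro ⟨h, -⟩; omega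
            have hc2 : a ≤ (j : Int) ∧ (j : Int) < b ∧ (j : Int) < 1001 ∧ j < cur.length := by
              refine ⟨by omega, by omega, by omega, hjl⟩
            rw [if_neg hc1, if_pos hc2, h1]
          · have h1 : (cur.set a.toNat (-1)).getD j 0 = cur.getD j 0 := by
              rw [List.getD_eq_getElem?_getD, List.getD_eq_getElem?_getD,
                List.getElem?_eq_none (by rw [List.length_set]; omega),
                List.getElem?_eq_none (by omega)]
            have hc2 : ¬(a ≤ (j : Int) ∧ (j : Int) < b ∧ (j : Int) < 1001 ∧ j < cur.length) := by
              rintro ⟨-, -, -, h⟩; omega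
            have hc1 : ¬((a + 1 ≤ (j : Int)) ∧ (j : Int) < b ∧ (j : Int) < 1001 ∧
                j < (cur.set a.toNat (-1)).length) := by
              rintro ⟨-, -, -, h⟩; omega
            rw [if_neg hc1, if_neg hc2, h1]
        · have h1 : (cur.set a.toNat (-1)).getD j 0 = cur.getD j 0 := by
            rw [List.getD_eq_getElem?_getD, List.getD_eq_getElem?_getD,
              List.getElem?_set_ne (by omega)]
          have hiff : ((a + 1 ≤ (j : Int)) ∧ (j : Int) < b ∧ (j : Int) < 1001 ∧
              j < (cur.set a.toNat (-1)).length) ↔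
              (a ≤ (j : Int) ∧ (j : Int) < b ∧ (j : Int) < 1001 ∧ j < cur.length) := by
            rw [hlen]
            constructor
            · rintro ⟨h, hs⟩; exact ⟨by omega, hs⟩
            · rintro ⟨h, hs⟩; exact ⟨by omega, hs⟩
          rw [if_congr hiff rfl rfl, h1]

-- main loop invariant: A's mutated list agrees with `leaks` above `cov`, is -1 below it
theorem key (l : Int) (leaks : List Int) :
    ∀ (rest : List Int) (k : Nat) (cur : List Int) (ans cov : Int),
      rest = leaks.drop k →
      cur.length = leaks.length →
      (∀ j : Nat, k ≤ j → j < leaks.length →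
        cur.getD j 0 = if (j : Int) < cov then -1 else leaks.getD j 0) →
      (loopA l (List.range' k rest.length) (cur, ans)).2 =
        loopB l (PySem.List.enumerate rest (k : Int)) (ans, cov) := by
  intro rest
  induction rest with
  | nil => intro k cur ans cov _ _ _; simp [loopA, loopB, PySem.List.enumerate]
  | cons v rest' ih =>
      intro k cur ans cov hdrop hlen hinv
      have hk : k < leaks.length := by
        by_contra h
        rw [List.drop_eq_nil_of_le (by omega)] at hdrop
        simp at hdrop
      have hdk : leaks.drop k = leaks[k] :: leaks.drop (k + 1) := List.drop_eq_getElem_cons hk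
      rw [hdk] at hdrop
      have hv : v = leaks[k] := (List.cons.injEq _ _ _ _ ▸ hdrop).1
      have hrest' : rest' = leaks.drop (k + 1) := (List.cons.injEq _ _ _ _ ▸ hdrop).2
      have hvD : leaks.getD k 0 = v := by
        rw [List.getD_eq_getElem?_getD, List.getElem?_eq_getElem hk]; simp [hv]
      have hcur : cur.getD k 0 = if (k : Int) < cov then -1 else v := by
        rw [hinv k le_rfl hk, hvD]
      have hrange : List.range' k (v :: rest').length = k :: List.range' (k + 1) rest'.length := by
        simp [List.range'_succ]
      rw [hrange]
      rw [show PySem.List.enumerate (v :: rest') (k : Int) =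
        ((k : Int), v) :: PySem.List.enumerate rest' ((k : Int) + 1) from rfl]
      simp only [loopA, loopB]
      by_cases hcov : (k : Int) < cov
      · -- already covered: A reads -1, B's `cov ≤ k` test fails
        rw [hcur, if_pos hcov]
        have hB : ¬(v = 1 ∧ cov ≤ (k : Int)) := by rintro ⟨-, h⟩; omega
        rw [if_neg hB]
        have := ih (k + 1) cur ans cov hrest' hlen
          (fun j hj hjl => hinv j (by omega) hjl)
        simpa using this
      · rw [hcur, if_neg hcov]
        have hcov' : cov ≤ (k : Int) := by omega
        by_cases hv1 : v = -1
        · subst hv1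
          have hB : ¬((-1 : Int) = 1 ∧ cov ≤ (k : Int)) := by rintro ⟨h, -⟩; omega
          rw [if_neg hB]
          have := ih (k + 1) cur ans cov hrest' hlen
            (fun j hj hjl => hinv j (by omega) hjl)
          simpa using this
        · rw [if_neg hv1]
          by_cases hv2 : v = 1
          · subst hv2
            rw [if_pos rfl, if_pos ⟨rfl, hcov'⟩]
            have hlen' : (markA cur (PySem.List.pyRange (k : Int) ((k : Int) + l) 1)).length
                = leaks.length := by rw [markA_length, hlen]
            refine (ih (k + 1) _ (ans + 1) (min ((k : Int) + l) 1001) hrest' hlen' ?_).trans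
              (by norm_num)
            intro j hj hjl
            rw [markA_getD ((k : Int) + l) ((k : Int) + l - k).toNat (k : Int)
              (by omega) rfl cur j]
            by_cases hjc : (j : Int) < min ((k : Int) + l) 1001
            · have : (k : Int) ≤ (j : Int) ∧ (j : Int) < (k : Int) + l ∧ (j : Int) < 1001 ∧
                  j < cur.length := ⟨by omega, by omega, by omega, by omega⟩
              simp [this, hjc]
            · have : ¬((k : Int) ≤ (j : Int) ∧ (j : Int) < (k : Int) + l ∧ (j : Int) < 1001 ∧
                  j < cur.length) := by rintro ⟨-, h2, h3, -⟩; omega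
              rw [if_neg this, if_neg hjc, hinv j (by omega) hjl,
                if_neg (by omega : ¬((j : Int) < cov))]
          · rw [if_neg hv2]
            have hB : ¬(v = 1 ∧ cov ≤ (k : Int)) := by rintro ⟨h, -⟩; exact hv2 h
            rw [if_neg hB]
            have := ih (k + 1) cur ans cov hrest' hlen
              (fun j hj hjl => hinv j (by omega) hjl)
            simpa using this

-- ===== VERDICT (by name: the statement is the Claim_ definition above) =====
theorem solution_spec : Claim_equal_solution := by
  intro n l leaks _ _
  unfold Spec_solution solution solution_alt
  rw [List.range_eq_range']
  have h := key l leaks leaks 0 leaks 0 0 rfl rfl (by intro j _ _; simp)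
  simpa using h
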